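-- pv_equiv track=rewrite | github.com/Bracktus/bits-n-bobs | university/CM3109-Combinatorial-Optimisation/tuning.py | kemeny_naive
-- ===== SOURCE A (Python) =====
-- from collections import defaultdict
--
-- def kemeny_naive(ranking, tourney):
--     """Naive way of calculating scores"""
--     score = 0
--     for i in range(len(ranking)):
--         for j in range(i + 1, len(ranking)):
--             pair = (ranking[j], ranking[i])
--             if pair in tourney:
--                 score += tourney[pair]
--     return score
--
-- tourney = defaultdict(int)
-- ===== SOURCE B (Python) =====
-- def kemeny_naive(ranking, tourney):
--     """Index tourney by first component once, then a single left-to-right pass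
--     over the ranking with a running multiplicity table of the values seen so
--     far -- O(len(ranking) + len(tourney)) instead of a scan of all pairs."""
--     index = {}
--     for (a, b), w in tourney.items():
--         index.setdefault(a, []).append((b, w))
--     seen = {}
--     score = 0
--     for a in ranking:
--         for b, w in index.get(a, []):
--             score += w * seen.get(b, 0)
--         seen[a] = seen.get(a, 0) + 1
--     return score
-- ===== Notes on version B (the rewrite author's own statement) =====
-- stated objective: faster
-- what changed: Instead of scanning all O(n^2) ordered pairs of ranking positions and looking each pair up in the tournament dict, B indexes the tournament by first component once and makes a single left-to-right pass over the ranking with a running multiplicity table of values seen so far.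
import Mathlib
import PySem

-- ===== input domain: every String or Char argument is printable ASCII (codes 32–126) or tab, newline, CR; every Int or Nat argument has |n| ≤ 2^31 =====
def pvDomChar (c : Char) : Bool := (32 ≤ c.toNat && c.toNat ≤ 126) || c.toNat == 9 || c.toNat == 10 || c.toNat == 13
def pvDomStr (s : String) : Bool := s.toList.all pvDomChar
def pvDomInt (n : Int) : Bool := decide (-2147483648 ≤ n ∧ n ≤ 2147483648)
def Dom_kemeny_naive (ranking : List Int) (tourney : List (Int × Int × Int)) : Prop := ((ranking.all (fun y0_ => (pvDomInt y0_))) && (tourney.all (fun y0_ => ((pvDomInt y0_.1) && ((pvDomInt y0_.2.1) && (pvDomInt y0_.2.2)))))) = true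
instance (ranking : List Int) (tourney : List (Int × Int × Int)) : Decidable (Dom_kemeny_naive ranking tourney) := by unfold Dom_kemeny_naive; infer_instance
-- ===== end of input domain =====

-- B replaces A's scan over all ordered ranking pairs (a tournament lookup per pair) by an
-- index of the tournament built once and a single pass over the ranking with a running
-- multiplicity table of the values seen so far.

-- ===== PORT A =====
-- 'pair in tourney' / 'tourney[pair]' on the association list: first matching key.
def pvLookup? (t : List (Int × Int × Int)) (p : Int × Int) : Option Int :=
  match t with
  | [] => none
  | (x, y, w) :: ts => if x = p.1 ∧ y = p.2 then some w else pvLookup? ts p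

def kemeny_naive (ranking : List Int) (tourney : List (Int × Int × Int)) : Int :=
  (PySem.List.pyRange 0 (ranking.length : Int) 1).foldl (fun score i =>
    (PySem.List.pyRange (i + 1) (ranking.length : Int) 1).foldl (fun score j =>
      match pvLookup? tourney (PySem.List.pyGetD ranking j 0, PySem.List.pyGetD ranking i 0) with
      | some w => score + w
      | none => score) score) 0

-- ===== PORT B =====
-- the loop 'for (a, b), w in tourney.items(): index.setdefault(a, []).append((b, w))'
def pvIndexD (t : List (Int × Int × Int)) : PySem.Dict Int (List (Int × Int)) :=
  t.foldl (fun d e => d.modify e.1 [] (fun l => l ++ [(e.2.1, e.2.2)])) PySem.Dict.empty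

def kemeny_naive_alt (ranking : List Int) (tourney : List (Int × Int × Int)) : Int :=
  let index := pvIndexD tourney
  -- state: (score, seen); 'seen[a] = seen.get(a, 0) + 1' is Dict.modify a 0 (· + 1)
  (ranking.foldl (fun (st : Int × PySem.Dict Int Int) a =>
      ((index.getD a []).foldl (fun s p => s + p.2 * st.2.getD p.1 0) st.1,
       st.2.modify a 0 (fun c => c + 1))) (0, PySem.Dict.empty)).1

-- ===== PRECONDITION & SPEC =====
-- Pre_ excludes only association lists with duplicate tournament keys: those are not
-- representable as the Python dict A and B receive, and there A's first-match lookup vs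
-- B's per-entry pass is anybody's choice.  Rankings are unrestricted.
def Pre_kemeny_naive (ranking : List Int) (tourney : List (Int × Int × Int)) : Prop :=
  (tourney.map (fun e => (e.1, e.2.1))).Nodup
instance (ranking : List Int) (tourney : List (Int × Int × Int)) : Decidable (Pre_kemeny_naive ranking tourney) := by unfold Pre_kemeny_naive; infer_instance

def pvWitness_kemeny_naive : List Int × (List (Int × Int × Int)) := ([1, 2, 3], [(2, 1, 3), (3, 1, 4)])

def Spec_kemeny_naive (ranking : List Int) (tourney : List (Int × Int × Int)) (out : Int) : Prop := out = kemeny_naive_alt ranking tourney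
instance (ranking : List Int) (tourney : List (Int × Int × Int)) (out : Int) : Decidable (Spec_kemeny_naive ranking tourney out) := by unfold Spec_kemeny_naive; infer_instance

-- ===== CLAIM (what is proved, stated in full; the proofs are below) =====
def Claim_equal_kemeny_naive : Prop := ∀ (ranking : List Int) (tourney : List (Int × Int × Int)), Dom_kemeny_naive ranking tourney → Pre_kemeny_naive ranking tourney → Spec_kemeny_naive ranking tourney (kemeny_naive ranking tourney)

-- ===== LEMMAS AND PROOFS =====

-- the weight A adds for one pair of positions: tourney.get((a, b), 0)
def pvGd (t : List (Int × Int × Int)) (a b : Int) : Int := (pvLookup? t (a, b)).getD 0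

-- A's nested loops as a double sum of pvGd over position pairs
def pvSA (t : List (Int × Int × Int)) (r : List Int) : Int :=
  ((PySem.List.pyRange 0 (r.length : Int) 1).map (fun i =>
    ((PySem.List.pyRange (i + 1) (r.length : Int) 1).map (fun j =>
      pvGd t (PySem.List.pyGetD r j 0) (PySem.List.pyGetD r i 0))).sum)).sum

lemma pvA_as_sum (r : List Int) (t : List (Int × Int × Int)) :
    kemeny_naive r t = pvSA t r := by
  unfold kemeny_naive pvSA
  have hbody : ∀ (i : Int), (fun (score j : Int) =>
      match pvLookup? t (PySem.List.pyGetD r j 0, PySem.List.pyGetD r i 0) with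
      | some w => score + w
      | none => score)
      = fun score j => score + pvGd t (PySem.List.pyGetD r j 0) (PySem.List.pyGetD r i 0) := by
    intro i; funext score j
    unfold pvGd
    cases pvLookup? t (PySem.List.pyGetD r j 0, PySem.List.pyGetD r i 0) <;> simp
  have houter : (fun (score i : Int) =>
      (PySem.List.pyRange (i + 1) (r.length : Int) 1).foldl (fun score j =>
        match pvLookup? t (PySem.List.pyGetD r j 0, PySem.List.pyGetD r i 0) with
        | some w => score + w
        | none => score) score)
      = fun score i => score + ((PySem.List.pyRange (i + 1) (r.length : Int) 1).map (fun j =>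
          pvGd t (PySem.List.pyGetD r j 0) (PySem.List.pyGetD r i 0))).sum := by
    funext score i
    rw [hbody i, PySem.List.foldl_add]
  rw [houter, PySem.List.foldl_add, zero_add]

lemma pvLookup_none (t : List (Int × Int × Int)) (p : Int × Int)
    (h : p ∉ t.map (fun e => (e.1, e.2.1))) : pvLookup? t p = none := by
  induction t with
  | nil => rfl
  | cons e ts ih =>
    obtain ⟨x, y, w⟩ := e
    simp only [List.map_cons, List.mem_cons, not_or] at h
    simp only [pvLookup?]
    rw [if_neg, ih h.2]
    rintro ⟨h1, h2⟩
    exact h.1 (by simp [h1, h2])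

lemma pvGd_cons (x y w : Int) (ts : List (Int × Int × Int))
    (h : (x, y) ∉ ts.map (fun e => (e.1, e.2.1))) (a b : Int) :
    pvGd ((x, y, w) :: ts) a b = (if x = a ∧ y = b then w else 0) + pvGd ts a b := by
  unfold pvGd
  simp only [pvLookup?]
  by_cases hc : x = a ∧ y = b
  · obtain ⟨h1, h2⟩ := hc
    subst h1; subst h2
    rw [if_pos ⟨rfl, rfl⟩, if_pos ⟨rfl, rfl⟩, pvLookup_none ts (x, y) h]
    simp
  · rw [if_neg hc, if_neg hc, zero_add]

-- the built index at key a holds exactly tourney's entries with first component a, in order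
lemma pvIndexD_getD (t : List (Int × Int × Int)) (a : Int) :
    (pvIndexD t).getD a [] = (t.filter (fun e => e.1 == a)).map (fun e => (e.2.1, e.2.2)) := by
  induction t using List.reverseRecOn with
  | nil => simp [pvIndexD]
  | append_singleton ts e ih =>
    obtain ⟨x, y, w⟩ := e
    unfold pvIndexD at *
    rw [List.foldl_append, List.foldl_cons, List.foldl_nil, PySem.Dict.getD_modify,
      List.filter_append, List.map_append]
    by_cases hx : a = x
    · subst hx
      simp [ih]
    · simp [hx, Ne.symm hx, ih]

lemma pvSum_ite_count (p : List Int) (y w : Int) :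
    (p.map (fun v => if y = v then w else 0)).sum = w * (p.count y : Int) := by
  induction p with
  | nil => simp
  | cons v vs ih =>
    simp only [List.map_cons, List.sum_cons, List.count_cons, ih]
    by_cases hv : y = v
    · subst hv; simp; ring
    · simp [hv, Ne.symm hv]

-- the crux: B's weighted multiplicity sum for one ranking element a equals A's total
-- lookup weight of a against every earlier element v of the prefix p
lemma pvIndex_sum (t : List (Int × Int × Int)) (ht : (t.map (fun e => (e.1, e.2.1))).Nodup)
    (a : Int) (p : List Int) :
    (((t.filter (fun e => e.1 == a)).map (fun e => (e.2.1, e.2.2))).map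
        (fun bw => bw.2 * (p.count bw.1 : Int))).sum
      = (p.map (fun v => pvGd t a v)).sum := by
  induction t with
  | nil => simp [pvGd, pvLookup?]
  | cons e ts ih =>
    obtain ⟨x, y, w⟩ := e
    rw [List.map_cons, List.nodup_cons] at ht
    have hsplit : (p.map (fun v => pvGd ((x, y, w) :: ts) a v))
        = p.map (fun v => (if x = a ∧ y = v then w else 0) + pvGd ts a v) :=
      List.map_congr_left (fun v _ => pvGd_cons x y w ts ht.1 a v)
    rw [hsplit, PySem.List.sum_map_add_int, ← ih ht.2]
    by_cases hx : x = a
    · subst hx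
      rw [List.filter_cons_of_pos (by simp), List.map_cons, List.map_cons, List.sum_cons]
      have : (p.map (fun v => if x = x ∧ y = v then w else 0)).sum = w * (p.count y : Int) := by
        rw [← pvSum_ite_count p y w]
        exact congrArg _ (List.map_congr_left (fun v _ => by simp))
      rw [this]
    · rw [List.filter_cons_of_neg (by simp [hx])]
      have : (p.map (fun v => if x = a ∧ y = v then w else 0)).sum = 0 := by
        rw [List.map_congr_left (fun v _ => by simp [hx] : ∀ v ∈ p, _ = (fun _ => (0:Int)) v)]
        simp
      rw [this, zero_add]

lemma pvGetD_append_left (r : List Int) (a : Int) (j : Int) (h0 : 0 ≤ j) (h : j < (r.length : Int)) :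
    PySem.List.pyGetD (r ++ [a]) j 0 = PySem.List.pyGetD r j 0 := by
  have h' : j < ((r ++ [a]).length : Int) := by simp; omega
  rw [PySem.List.pyGetD_eq_getElem _ 0 h0 h', PySem.List.pyGetD_eq_getElem r 0 h0 h]
  exact List.getElem_append_left (by omega)

-- extending the ranking by one element adds its weight against every earlier element
lemma pvSA_append (t : List (Int × Int × Int)) (r : List Int) (a : Int) :
    pvSA t (r ++ [a]) = pvSA t r + (r.map (fun v => pvGd t a v)).sum := by
  unfold pvSA
  have hn : (((r ++ [a]).length : Nat) : Int) = (r.length : Int) + 1 := by simp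
  rw [hn]
  rw [PySem.List.pyRange_one_succ_right (by positivity), List.map_append, List.sum_append]
  have houter : ∀ i ∈ PySem.List.pyRange 0 (r.length : Int) 1,
      ((PySem.List.pyRange (i + 1) ((r.length : Int) + 1) 1).map (fun j =>
        pvGd t (PySem.List.pyGetD (r ++ [a]) j 0) (PySem.List.pyGetD (r ++ [a]) i 0))).sum
      = ((PySem.List.pyRange (i + 1) (r.length : Int) 1).map (fun j =>
          pvGd t (PySem.List.pyGetD r j 0) (PySem.List.pyGetD r i 0))).sum
        + pvGd t a (PySem.List.pyGetD r i 0) := by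
    intro i hi
    rw [PySem.List.mem_pyRange_one] at hi
    rw [PySem.List.pyRange_one_succ_right (by omega), List.map_append, List.sum_append]
    have hgi : PySem.List.pyGetD (r ++ [a]) i 0 = PySem.List.pyGetD r i 0 :=
      pvGetD_append_left r a i hi.1 hi.2
    have hinner : ∀ j ∈ PySem.List.pyRange (i + 1) (r.length : Int) 1,
        pvGd t (PySem.List.pyGetD (r ++ [a]) j 0) (PySem.List.pyGetD (r ++ [a]) i 0)
        = pvGd t (PySem.List.pyGetD r j 0) (PySem.List.pyGetD r i 0) := by
      intro j hj
      rw [PySem.List.mem_pyRange_one] at hj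
      rw [hgi, pvGetD_append_left r a j (by omega) hj.2]
    rw [List.map_congr_left hinner]
    simp [hgi]
  rw [List.map_congr_left houter]
  have hlast : (List.map (fun i =>
      (List.map (fun j => pvGd t (PySem.List.pyGetD (r ++ [a]) j 0) (PySem.List.pyGetD (r ++ [a]) i 0))
        (PySem.List.pyRange (i + 1) ((r.length : Int) + 1))).sum) [(r.length : Int)]).sum = 0 := by
    simp only [List.map_cons, List.map_nil, List.sum_cons, List.sum_nil, add_zero]
    rw [PySem.List.pyRange_one_eq_nil (le_refl _)]
    simp
  rw [hlast, add_zero, PySem.List.sum_map_add_int]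
  have : (PySem.List.pyRange 0 (r.length : Int) 1).map (fun i => pvGd t a (PySem.List.pyGetD r i 0))
      = r.map (fun v => pvGd t a v) := by
    conv_rhs => rw [← PySem.List.map_pyGetD_pyRange_zero' r 0]
    rw [List.map_map]
    rfl
  rw [this]

-- loop invariant of B's pass: state after a prefix = (A's pair sum over it, its counter)
lemma pvLoop (t : List (Int × Int × Int)) (ht : (t.map (fun e => (e.1, e.2.1))).Nodup)
    (r : List Int) :
    r.foldl (fun (st : Int × PySem.Dict Int Int) a =>
        (((pvIndexD t).getD a []).foldl (fun s p => s + p.2 * st.2.getD p.1 0) st.1,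
         st.2.modify a 0 (fun c => c + 1))) (0, PySem.Dict.empty)
      = (pvSA t r, PySem.Dict.counter r) := by
  induction r using List.reverseRecOn with
  | nil =>
    simp [pvSA, PySem.Dict.counter_eq_foldl, PySem.List.pyRange_one_eq_nil (le_refl 0)]
  | append_singleton p a ih =>
    rw [List.foldl_append, ih, List.foldl_cons, List.foldl_nil]
    refine Prod.ext ?_ ?_
    · show (((pvIndexD t).getD a []).foldl (fun s q => s + q.2 * (PySem.Dict.counter p).getD q.1 0) (pvSA t p)) = pvSA t (p ++ [a])
      rw [PySem.List.foldl_add, pvIndexD_getD]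
      have hc : ((t.filter (fun e => e.1 == a)).map (fun e => (e.2.1, e.2.2))).map
            (fun q => q.2 * (PySem.Dict.counter p).getD q.1 0)
          = ((t.filter (fun e => e.1 == a)).map (fun e => (e.2.1, e.2.2))).map
            (fun q => q.2 * (p.count q.1 : Int)) :=
        List.map_congr_left (fun q _ => by rw [PySem.Dict.getD_counter])
      rw [hc, pvIndex_sum t ht a p, pvSA_append]
    · show (PySem.Dict.counter p).modify a 0 (fun c => c + 1) = PySem.Dict.counter (p ++ [a])
      rw [PySem.Dict.counter_eq_foldl, PySem.Dict.counter_eq_foldl, List.foldl_append,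
        List.foldl_cons, List.foldl_nil]

theorem pvMain (r : List Int) (t : List (Int × Int × Int))
    (ht : (t.map (fun e => (e.1, e.2.1))).Nodup) :
    kemeny_naive r t = kemeny_naive_alt r t := by
  have hdef : kemeny_naive_alt r t =
      (r.foldl (fun (st : Int × PySem.Dict Int Int) a =>
        (((pvIndexD t).getD a []).foldl (fun s p => s + p.2 * st.2.getD p.1 0) st.1,
         st.2.modify a 0 (fun c => c + 1))) (0, PySem.Dict.empty)).1 := rfl
  rw [pvA_as_sum, hdef, pvLoop t ht r]

-- ===== VERDICT (by name: the statement is the Claim_ definition above) =====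
theorem kemeny_naive_spec : Claim_equal_kemeny_naive := by
  intro ranking tourney _ hpre
  exact pvMain ranking tourney hpre
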